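-- pv_equiv track=rewrite | github.com/SSAFYnity/Job-Preparation-Challenge-1st | Baekjoon/문자열교환/문자열교환_이재민.py | solution
-- ===== SOURCE A (Python) =====
-- def solution(target:str,ab_string:str)->int:
--     l = len(ab_string)
--     target_cnt = ab_string.count(target)
--     if target_cnt == 0 or target_cnt == l: return 0
--     value = 0
--     for i in range(target_cnt):
--         if ab_string[i] != target:value += 1
--     minValue = value
--     for i in range(l):
--         if ab_string[i] != target:value-=1
--         if ab_string[(i+target_cnt)%l] != target: value+=1
--         minValue = min(minValue,value)
--     return minValue
-- ===== SOURCE B (Python) =====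
-- def solution(target: str, ab_string: str) -> int:
--     l = len(ab_string)
--     cnt = ab_string.count(target)
--     if cnt == 0 or cnt == l:
--         return 0
--     ext = ab_string + ab_string
--     pre = [0]
--     run = 0
--     for ch in ext:
--         run += (ch == target)
--         pre.append(run)
--     return min(cnt - (pre[s + cnt] - pre[s]) for s in range(l))
-- ===== Notes on version B (the rewrite author's own statement) =====
-- stated objective: alternative
-- what changed: Replaces A's maintained running mismatch counter (seeded by a separate first loop, then updated with modular add/remove per slide) by a prefix-sum table of the match indicator over the doubled string, reading each window's match count as a difference of two table entries and taking the min over window starts.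
import Mathlib
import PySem

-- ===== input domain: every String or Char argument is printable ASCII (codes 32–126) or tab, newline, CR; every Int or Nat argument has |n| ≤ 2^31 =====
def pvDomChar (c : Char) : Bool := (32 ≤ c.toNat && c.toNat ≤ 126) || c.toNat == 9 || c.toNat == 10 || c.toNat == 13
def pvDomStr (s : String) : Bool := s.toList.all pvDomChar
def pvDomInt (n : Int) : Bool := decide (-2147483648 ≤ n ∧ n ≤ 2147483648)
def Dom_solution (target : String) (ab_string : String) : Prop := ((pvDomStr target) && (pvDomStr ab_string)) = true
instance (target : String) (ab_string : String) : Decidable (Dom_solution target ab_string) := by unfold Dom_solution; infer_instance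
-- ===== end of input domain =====

-- B replaces A's maintained running mismatch counter by a prefix-sum table of the match
-- indicator over the doubled string, reading each window by two table lookups (objective: alternative).

-- ===== PORT A =====
-- ab_string[i] != target : the character is a 1-char string compared with target;
-- 'none' is Python's IndexError (excluded by Pre_solution), the branch value is unreachable there.
def pvCharNe (oc : Option Char) (t : String) : Bool :=
  match oc with
  | some ch => String.ofList [ch] != t
  | none => false

def solution (target : String) (ab_string : String) : Int :=
  let l : Int := PySem.Str.len ab_string
  let target_cnt : Int := (PySem.Str.count ab_string target : Int)
  if target_cnt = 0 ∨ target_cnt = l then 0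
  else
    let value : Int := (PySem.List.pyRange 0 target_cnt 1).foldl
      (fun v i => if pvCharNe (PySem.Str.pyGet? ab_string i) target then v + 1 else v) 0
    ((PySem.List.pyRange 0 l 1).foldl
      (fun (st : Int × Int) i =>
        let v1 := if pvCharNe (PySem.Str.pyGet? ab_string i) target then st.1 - 1 else st.1
        let v2 := if pvCharNe (PySem.Str.pyGet? ab_string (PySem.Int.mod (i + target_cnt) l)) target
                  then v1 + 1 else v1
        (v2, min st.2 v2)) (value, value)).2

-- ===== PORT B =====
def solution_alt (target : String) (ab_string : String) : Int :=
  let l : Int := PySem.Str.len ab_string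
  let cnt : Int := (PySem.Str.count ab_string target : Int)
  if cnt = 0 ∨ cnt = l then 0
  else
    let ext : List Char := ab_string.toList ++ ab_string.toList
    let pre : List Int := (ext.foldl
      (fun (p : List Int × Int) ch =>
        let run := p.2 + (if String.ofList [ch] == target then 1 else 0)
        (p.1 ++ [run], run)) ([0], 0)).1
    -- pre[s] / pre[s+cnt]: indices are always in range here, the default is never used
    let vals := (PySem.List.pyRange 0 l 1).map
      (fun s => cnt - (PySem.List.pyGetD pre (s + cnt) 0 - PySem.List.pyGetD pre s 0))
    (PySem.List.min? vals (fun x => x)).getD 0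

-- ===== PRECONDITION & SPEC =====
-- Pre_ excludes exactly target = "": there ab_string.count("") = len+1 and A's first loop
-- indexes ab_string[len], an IndexError (A raises; nothing else is excluded).
def Pre_solution (target : String) (ab_string : String) : Prop := target ≠ ""
instance (target : String) (ab_string : String) : Decidable (Pre_solution target ab_string) := by
  unfold Pre_solution; infer_instance

def pvWitness_solution : String × String := ("a", "aab")

def Spec_solution (target : String) (ab_string : String) (out : Int) : Prop := out = solution_alt target ab_string
instance (target : String) (ab_string : String) (out : Int) : Decidable (Spec_solution target ab_string out) := by unfold Spec_solution; infer_instance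

-- ===== CLAIM (what is proved, stated in full; the proofs are below) =====
def Claim_equal_solution : Prop := ∀ (target : String) (ab_string : String), Dom_solution target ab_string → Pre_solution target ab_string → Spec_solution target ab_string (solution target ab_string)

-- ===== LEMMAS AND PROOFS =====

-- count(sub) over a nonempty sub never exceeds the length of the string
theorem pv_go_le (sub : List Char) (h : sub ≠ []) :
    ∀ (fuel : ℕ) (s : List Char) (acc : ℕ), PySem.Chars.count.go sub fuel s acc ≤ acc + s.length := by
  intro fuel
  induction fuel with
  | zero => intro s acc; simp [PySem.Chars.count.go]
  | succ n ih =>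
    intro s acc
    cases s with
    | nil => simp [PySem.Chars.count.go]
    | cons hd t =>
      rw [PySem.Chars.count.go]
      split
      · have h1 := ih (List.drop sub.length (hd :: t)) (acc + 1)
        have hlen : sub.length ≥ 1 := by cases sub <;> simp_all
        have h2 : (List.drop sub.length (hd :: t)).length = (hd :: t).length - sub.length :=
          List.length_drop
        simp at *
        omega
      · have := ih t acc
        simp at *
        omega

theorem pv_count_le (s sub : List Char) (h : sub ≠ []) : PySem.Chars.count s sub ≤ s.length := by
  rw [PySem.Chars.count]
  simp [List.isEmpty_iff, h]
  simpa using pv_go_le sub h s.length s 0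

-- the mismatch predicate of the loops and the match predicate of the prefix table
def pvQ (t : String) (ch : Char) : Bool := String.ofList [ch] != t

-- number of mismatches of the window of length c starting at s in the doubled string
def pvMis (t : String) (cs : List Char) (c s : ℕ) : Int :=
  (((((cs ++ cs)).drop s).take c).countP (pvQ t) : Int)

-- sliding one step exchanges the departing and the arriving cell
theorem pv_slide (xs : List Char) (p : Char → Bool) (s c : ℕ) (h : s + c < xs.length) :
    ((xs.drop (s+1)).take c).countP p + (if p (xs.getD s 'a') then 1 else 0)
      = ((xs.drop s).take c).countP p + (if p (xs.getD (s+c) 'a') then 1 else 0) := by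
  have hs : s < xs.length := by omega
  have e2 : xs.drop s = xs[s] :: xs.drop (s+1) := List.drop_eq_getElem_cons hs
  have e1 : (xs.drop s).take (c+1) = (xs.drop s).take c ++ ((xs.drop s)[c]?).toList :=
    List.take_add_one
  have hq : (xs.drop s)[c]? = some xs[s+c] := by
    rw [List.getElem?_drop]
    exact List.getElem?_eq_getElem h
  rw [hq] at e1
  have lhs : ((xs.drop s).take (c+1)).countP p
      = ((xs.drop (s+1)).take c).countP p + (if p xs[s] then 1 else 0) := by
    rw [e2, List.take_succ_cons, List.countP_cons]
  have rhs : ((xs.drop s).take (c+1)).countP p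
      = ((xs.drop s).take c).countP p + (if p xs[s+c] then 1 else 0) := by
    rw [e1, List.countP_append]
    simp
  have g1 : xs.getD s 'a' = xs[s] := List.getD_eq_getElem xs 'a' hs
  have g2 : xs.getD (s+c) 'a' = xs[s+c] := List.getD_eq_getElem xs 'a' h
  rw [g1, g2]
  omega

-- doubled-string indexing is modular indexing
theorem pv_ext_idx (cs : List Char) (k : ℕ) (hk : k < 2 * cs.length) :
    (cs ++ cs)[k]? = cs[k % cs.length]? := by
  by_cases h : k < cs.length
  · rw [List.getElem?_append_left h, Nat.mod_eq_of_lt h]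
  · have h1 : cs.length ≤ k := by omega
    rw [List.getElem?_append_right h1]
    congr 1
    rw [Nat.mod_eq_sub_mod h1, Nat.mod_eq_of_lt (by omega)]

theorem pv_first_loop (t S : String) : ∀ (c : ℕ), c ≤ S.toList.length →
    (PySem.List.pyRange 0 (c : Int) 1).foldl
      (fun v i => if pvCharNe (PySem.Str.pyGet? S i) t then v + 1 else v) 0
      = ((S.toList.take c).countP (pvQ t) : Int) := by
  intro c
  induction c with
  | zero => intro _; simp [PySem.List.pyRange_one_eq_nil]
  | succ c ih =>
    intro hc
    have h1 : ((c : ℕ) : Int) ≤ (c : Int) := le_refl _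
    have hr : PySem.List.pyRange 0 ((c : ℕ) + 1 : ℕ) 1
        = PySem.List.pyRange 0 (c : Int) 1 ++ [(c : Int)] := by
      push_cast
      exact PySem.List.pyRange_one_succ_right (by positivity)
    rw [hr, List.foldl_append, ih (by omega)]
    simp only [List.foldl_cons, List.foldl_nil]
    have hg : PySem.Str.pyGet? S ((c : ℕ) : Int) = some (S.toList[c]'(by omega)) := by
      simp
    rw [hg]
    have htake : S.toList.take (c+1) = S.toList.take c ++ [S.toList[c]'(by omega)] := by
      rw [List.take_add_one, List.getElem?_eq_getElem (by omega)]
      simp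
    rw [htake, List.countP_append]
    simp only [pvCharNe, pvQ, List.countP_cons, List.countP_nil]
    split <;> simp_all

theorem pv_second_loop (t S : String) (c : ℕ)
    (hc0 : 0 < c) (hcl : c < S.toList.length) : ∀ (n : ℕ), n ≤ S.toList.length →
    (PySem.List.pyRange 0 (n : Int) 1).foldl
      (fun (st : Int × Int) i =>
        let v1 := if pvCharNe (PySem.Str.pyGet? S i) t then st.1 - 1 else st.1
        let v2 := if pvCharNe (PySem.Str.pyGet? S
                    (PySem.Int.mod (i + (c : Int)) (S.toList.length : Int))) t
                  then v1 + 1 else v1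
        (v2, min st.2 v2)) (pvMis t S.toList c 0, pvMis t S.toList c 0)
      = (pvMis t S.toList c n,
         ((List.range n).map (fun k => pvMis t S.toList c (k+1))).foldl min (pvMis t S.toList c 0)) := by
  intro n
  induction n with
  | zero => intro _; simp [PySem.List.pyRange_one_eq_nil]
  | succ n ih =>
    intro hn
    have hnl : n < S.toList.length := by omega
    have hLL : S.toList.length = S.length := by simp
    have hcl' : c < S.length := by omega
    have hnl' : n < S.length := by omega
    have hr : PySem.List.pyRange 0 ((n : ℕ) + 1 : ℕ) 1
        = PySem.List.pyRange 0 (n : Int) 1 ++ [(n : Int)] := by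
      push_cast
      exact PySem.List.pyRange_one_succ_right (by positivity)
    rw [hr, List.foldl_append, ih (by omega)]
    simp only [List.foldl_cons, List.foldl_nil]
    have hg1 : PySem.Str.pyGet? S ((n : ℕ) : Int) = some (S.toList[n]'hnl) := by
      rw [PySem.Str.pyGet?_natCast]
      exact List.getElem?_eq_getElem hnl
    have hmod : PySem.Int.mod ((n : Int) + (c : Int)) ((S.toList.length : ℕ) : Int)
        = (((n + c) % S.toList.length : ℕ) : Int) := by
      push_cast
      exact_mod_cast PySem.Int.mod_natCast (n + c) S.toList.length
    have hext : (S.toList ++ S.toList)[n + c]? = S.toList[(n + c) % S.toList.length]? :=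
      pv_ext_idx S.toList _ (by omega)
    have h2l : n + c < (S.toList ++ S.toList).length := by simp; omega
    have hg2 : PySem.Str.pyGet? S (PySem.Int.mod ((n : Int) + (c : Int)) ((S.toList.length : ℕ) : Int))
        = some ((S.toList ++ S.toList)[n + c]'h2l) := by
      rw [hmod, PySem.Str.pyGet?_natCast, ← hext]
      exact List.getElem?_eq_getElem h2l
    rw [hg1, hg2]
    have hslide := pv_slide (S.toList ++ S.toList) (pvQ t) n c (by simp; omega)
    have gd1 : (S.toList ++ S.toList).getD n 'a' = S.toList[n]'hnl := by
      rw [List.getD_eq_getElem _ 'a' (by simp; omega)]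
      simp [List.getElem_append_left hnl]
    have gd2 : (S.toList ++ S.toList).getD (n + c) 'a' = (S.toList ++ S.toList)[n + c]'h2l :=
      List.getD_eq_getElem _ 'a' h2l
    rw [gd1, gd2] at hslide
    have hv : (let v1 := if pvCharNe (some (S.toList[n]'hnl)) t then pvMis t S.toList c n - 1 else pvMis t S.toList c n
               if pvCharNe (some ((S.toList ++ S.toList)[n + c]'h2l)) t then v1 + 1 else v1)
        = pvMis t S.toList c (n+1) := by
      simp only [pvCharNe, pvMis]
      split_ifs with h1 h2 <;> simp_all [pvQ] <;> omega
    simp only [] at hv ⊢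
    rw [hv]
    rw [List.range_succ, List.map_append, List.foldl_append]
    simp

theorem pv_pre_spec (t : String) (xs : List Char) : ∀ (acc : List Int) (r : Int),
    (xs.foldl (fun (p : List Int × Int) ch =>
        let run := p.2 + (if String.ofList [ch] == t then 1 else 0)
        (p.1 ++ [run], run)) (acc, r)).1
      = acc ++ (List.range xs.length).map
          (fun k => r + ((xs.take (k+1)).countP (fun ch => String.ofList [ch] == t) : Int)) := by
  induction xs with
  | nil => intro acc r; simp
  | cons x xs ih =>
    intro acc r
    simp only [List.foldl_cons]
    rw [ih]
    simp only [List.length_cons, List.range_succ_eq_map, List.map_cons, List.map_map]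
    simp [List.countP_cons, List.append_assoc]
    intro k _
    split <;> ring

theorem pv_mis_last (t : String) (cs : List Char) (c : ℕ) (hc : c ≤ cs.length) :
    pvMis t cs c cs.length = pvMis t cs c 0 := by
  unfold pvMis
  rw [List.drop_left, List.drop_zero, List.take_append_of_le_length hc]

-- zeta-reduced restatements matching the unfolded ports (proofs: the let-form lemmas above)
theorem pv_second_loop' (t S : String) (c : ℕ)
    (hc0 : 0 < c) (hcl : c < S.toList.length) (n : ℕ) (hn : n ≤ S.toList.length) :
    (PySem.List.pyRange 0 (n : Int) 1).foldl
      (fun (st : Int × Int) i =>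
        (if pvCharNe (PySem.Str.pyGet? S (PySem.Int.mod (i + (c : Int)) (S.toList.length : Int))) t = true then
           (if pvCharNe (PySem.Str.pyGet? S i) t = true then st.1 - 1 else st.1) + 1
         else if pvCharNe (PySem.Str.pyGet? S i) t = true then st.1 - 1 else st.1,
         min st.2
           (if pvCharNe (PySem.Str.pyGet? S (PySem.Int.mod (i + (c : Int)) (S.toList.length : Int))) t = true then
              (if pvCharNe (PySem.Str.pyGet? S i) t = true then st.1 - 1 else st.1) + 1
            else if pvCharNe (PySem.Str.pyGet? S i) t = true then st.1 - 1 else st.1)))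
      (pvMis t S.toList c 0, pvMis t S.toList c 0)
      = (pvMis t S.toList c n,
         ((List.range n).map (fun k => pvMis t S.toList c (k+1))).foldl min (pvMis t S.toList c 0)) :=
  pv_second_loop t S c hc0 hcl n hn

theorem pv_pre_spec' (t : String) (xs : List Char) (acc : List Int) (r : Int) :
    (xs.foldl (fun (p : List Int × Int) ch =>
        (p.1 ++ [p.2 + (if String.ofList [ch] == t then 1 else 0)],
         p.2 + (if String.ofList [ch] == t then 1 else 0))) (acc, r)).1
      = acc ++ (List.range xs.length).map
          (fun k => r + ((xs.take (k+1)).countP (fun ch => String.ofList [ch] == t) : Int)) :=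
  pv_pre_spec t xs acc r

-- reading the prefix table: entry m is the number of matches among the first m cells
theorem pv_getD (t : String) (cs : List Char) (m : ℕ) (hm : m ≤ (cs ++ cs).length) :
    (([(0 : Int)] ++ (List.range (cs ++ cs).length).map
        (fun k => (((cs ++ cs).take (k+1)).countP (fun ch => String.ofList [ch] == t) : Int))).getD m 0)
      = (((cs ++ cs).take m).countP (fun ch => String.ofList [ch] == t) : Int) := by
  cases m with
  | zero => simp
  | succ j =>
    have hj : j < ((List.range (cs ++ cs).length).map
        (fun k => (((cs ++ cs).take (k+1)).countP (fun ch => String.ofList [ch] == t) : Int))).length := by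
      simp only [List.length_map, List.length_range, List.length_append] at hm ⊢
      omega
    rw [List.singleton_append, List.getD_cons_succ, List.getD_eq_getElem _ _ hj]
    simp

-- A's running minimum also covers the wrapped window l, which equals window 0
theorem pv_amin (t : String) (cs : List Char) (c : ℕ) (hl : 0 < cs.length) (hcle : c ≤ cs.length) :
    ((List.range cs.length).map (fun k => pvMis t cs c (k+1))).foldl min (pvMis t cs c 0)
      = ((List.range (cs.length - 1)).map (fun k => pvMis t cs c (k+1))).foldl min (pvMis t cs c 0) := by
  conv_lhs => rw [show cs.length = (cs.length - 1) + 1 by omega, List.range_succ]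
  rw [List.map_append, List.foldl_append]
  simp only [List.map_cons, List.map_nil, List.foldl_cons, List.foldl_nil]
  rw [show (cs.length - 1) + 1 = cs.length by omega, pv_mis_last t cs c hcle]
  exact min_eq_left (PySem.List.foldl_min_le
    ((List.range (cs.length - 1)).map (fun k => pvMis t cs c (k+1))) (pvMis t cs c 0)).1

-- B's table-lookup minimum equals the fold of the window mismatch counts
theorem pv_bmin (t : String) (cs : List Char) (c : ℕ)
    (hcle : c ≤ cs.length) (hc0 : c ≠ 0) (hcl : c ≠ cs.length) :
    (PySem.List.min?
        (List.map
          (fun s => (c : Int) -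
            (PySem.List.pyGetD
                (List.foldl
                    (fun (p : List Int × Int) ch =>
                      (p.1 ++ [p.2 + if String.ofList [ch] == t then 1 else 0],
                        p.2 + if String.ofList [ch] == t then 1 else 0))
                    ([0], 0) (cs ++ cs)).1
                (s + (c : Int)) 0 -
              PySem.List.pyGetD
                (List.foldl
                    (fun (p : List Int × Int) ch =>
                      (p.1 ++ [p.2 + if String.ofList [ch] == t then 1 else 0],
                        p.2 + if String.ofList [ch] == t then 1 else 0))
                    ([0], 0) (cs ++ cs)).1
                s 0))
          (PySem.List.pyRange 0 (cs.length : Int) 1))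
        (fun x => x)).getD 0
      = ((List.range (cs.length - 1)).map (fun k => pvMis t cs c (k+1))).foldl min (pvMis t cs c 0) := by
  have hlpos : 0 < cs.length := by
    rcases Nat.eq_zero_or_pos cs.length with h | h
    · exact absurd (by omega : c = 0) hc0
    · exact h
  rw [pv_pre_spec' t (cs ++ cs) [0] 0]
  rw [PySem.List.pyRange_one, List.map_map]
  simp only [Int.sub_zero, Int.toNat_natCast]
  have hwin : ∀ k ∈ List.range cs.length,
      ((fun s => (c : Int) -
          (PySem.List.pyGetD ([0] ++ (List.range (cs ++ cs).length).map
              (fun j => (0 : Int) + (((cs ++ cs).take (j+1)).countP (fun ch => String.ofList [ch] == t) : Int)))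
            (s + (c : Int)) 0 -
           PySem.List.pyGetD ([0] ++ (List.range (cs ++ cs).length).map
              (fun j => (0 : Int) + (((cs ++ cs).take (j+1)).countP (fun ch => String.ofList [ch] == t) : Int)))
            s 0)) ∘ (fun k : ℕ => (0 : Int) + (k : Int))) k = pvMis t cs c k := by
    intro k hk
    have hkl : k < cs.length := List.mem_range.mp hk
    simp only [Function.comp_apply, zero_add]
    rw [show ((k : Int) + (c : Int)) = (((k + c : ℕ) : ℕ) : Int) by push_cast; ring]
    rw [PySem.List.pyGetD_natCast, PySem.List.pyGetD_natCast]
    rw [pv_getD t cs (k + c) (by rw [List.length_append]; omega),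
        pv_getD t cs k (by rw [List.length_append]; omega)]
    rw [List.take_add, List.countP_append]
    unfold pvMis
    have hlen : (((cs ++ cs).drop k).take c).length = c := by
      simp only [List.length_take, List.length_drop, List.length_append]
      omega
    have hcc := List.length_eq_countP_add_countP (fun ch => String.ofList [ch] == t)
      (l := ((cs ++ cs).drop k).take c)
    have hqc : List.countP (pvQ t) (((cs ++ cs).drop k).take c)
        = List.countP (fun ch => decide ¬((String.ofList [ch] == t) = true)) (((cs ++ cs).drop k).take c) := by
      apply List.countP_congr
      intro ch _
      simp [pvQ, bne]
    rw [hlen] at hcc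
    rw [hqc]
    push_cast
    omega
  rw [List.map_congr_left hwin]
  conv_lhs => rw [show cs.length = (cs.length - 1) + 1 by omega, List.range_succ_eq_map]
  simp only [List.map_cons, List.map_map]
  rw [PySem.List.min?_id_cons]
  simp only [Option.getD_some]
  congr 1

-- ===== VERDICT (by name: the statement is the Claim_ definition above) =====
theorem solution_spec : Claim_equal_solution := by
  intro target ab_string _ hpre
  unfold Spec_solution
  have htl : target.toList ≠ [] := by
    intro h
    exact hpre (by simpa using h)
  simp only [solution, solution_alt, PySem.Str.len_eq]
  by_cases hg : ((PySem.Str.count ab_string target : ℕ) : Int) = 0 ∨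
      ((PySem.Str.count ab_string target : ℕ) : Int) = ((ab_string.toList.length : ℕ) : Int)
  · rw [if_pos hg, if_pos hg]
  · rw [if_neg hg, if_neg hg]
    rw [not_or] at hg
    obtain ⟨hg0, hgl⟩ := hg
    have hc0 : PySem.Str.count ab_string target ≠ 0 := by exact_mod_cast hg0
    have hcl : PySem.Str.count ab_string target ≠ ab_string.toList.length := by exact_mod_cast hgl
    have hcle : PySem.Str.count ab_string target ≤ ab_string.toList.length := by
      rw [PySem.Str.count_eq]
      exact pv_count_le ab_string.toList target.toList htl
    have hclt : PySem.Str.count ab_string target < ab_string.toList.length := by omega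
    have hlpos : 0 < ab_string.toList.length := by omega
    -- A's seed loop computes the first window's mismatch count
    have hmis0 : pvMis target ab_string.toList (PySem.Str.count ab_string target) 0
        = ((ab_string.toList.take (PySem.Str.count ab_string target)).countP (pvQ target) : Int) := by
      unfold pvMis
      rw [List.drop_zero, List.take_append_of_le_length hcle]
    rw [pv_first_loop target ab_string (PySem.Str.count ab_string target) hcle, ← hmis0]
    have h2 := pv_second_loop' target ab_string (PySem.Str.count ab_string target)
          (by omega) hclt ab_string.toList.length le_rfl
    refine Eq.trans (congrArg Prod.snd h2) ?_
    rw [pv_amin target ab_string.toList (PySem.Str.count ab_string target) hlpos hcle]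
    exact (pv_bmin target ab_string.toList (PySem.Str.count ab_string target) hcle hc0 hcl).symm
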